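-- pv_equiv track=rewrite | github.com/mcraig-ibme/visdex | visdex/exploratory_graph_groups.py | create_arguments_nested_dict
-- ===== SOURCE A (Python) =====
-- from collections import defaultdict
--
-- def create_arguments_nested_dict(components_list, args):
--     # Generate the list of argument names based on the input order, paired by component
--     # id and property name
--     keys = [
--         (component["id"], prop) for component in components_list for prop in component
--     ]
--     # Convert inputs to a nested dict, with the outer key the component id, and the
--     # inner key the property name
--     args_dict = defaultdict(dict)
--     for key, value in zip(keys, args):
--         args_dict[key[0]][key[1]] = value
--     return args_dict
-- ===== SOURCE B (Python) =====
-- def create_arguments_nested_dict(components_list, args):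
--     # Group-by strategy: pair each (id, prop) position with its arg once, list the
--     # distinct component ids in first-occurrence order, then build every id's inner
--     # dict by its own filtered comprehension -- no incremental nested-dict mutation.
--     pairs = list(zip([(c["id"], p) for c in components_list for p in c], args))
--     ids = list(dict.fromkeys(cid for (cid, _p), _v in pairs))
--     return {cid: {p: v for (c, p), v in pairs if c == cid} for cid in ids}
-- ===== Notes on version B (the rewrite author's own statement) =====
-- stated objective: alternative
-- what changed: A fills one nested defaultdict incrementally in a single pass; B instead does a group-by: it lists the distinct component ids in first-occurrence order and builds each id's inner dict with its own filtered comprehension over the (position, arg) pairs, with no mutable nested dict (trades the single pass for per-id filtered scans).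
-- outside the precondition, e.g. on create_arguments_nested_dict([{'a': 'p'}], [1]): A raises KeyError, B raises KeyError
import Mathlib
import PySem

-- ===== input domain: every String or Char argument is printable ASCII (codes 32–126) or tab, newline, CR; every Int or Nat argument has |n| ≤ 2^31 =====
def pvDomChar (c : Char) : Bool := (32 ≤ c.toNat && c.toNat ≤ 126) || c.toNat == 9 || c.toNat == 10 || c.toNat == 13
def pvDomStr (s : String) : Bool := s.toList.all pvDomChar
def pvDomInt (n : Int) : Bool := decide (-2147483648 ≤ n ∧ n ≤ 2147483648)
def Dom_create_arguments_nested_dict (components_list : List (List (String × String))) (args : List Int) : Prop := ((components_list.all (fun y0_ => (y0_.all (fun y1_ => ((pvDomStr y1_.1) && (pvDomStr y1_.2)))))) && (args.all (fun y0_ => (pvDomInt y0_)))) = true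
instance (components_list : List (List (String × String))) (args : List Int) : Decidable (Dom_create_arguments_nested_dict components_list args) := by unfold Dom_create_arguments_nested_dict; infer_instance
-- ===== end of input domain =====

-- B replaces A's single-pass nested-defaultdict fill by a group-by: ordered distinct
-- ids, then one filtered comprehension per id; stated objective: alternative.


-- ===== PORT A =====
-- component["id"]  (under Pre_ the key is present whenever it is evaluated)
def pvCid (c : List (String × String)) : String :=
  (PySem.Dict.get? (PySem.Dict.mk c) "id").getD ""

-- args_dict[key[0]][key[1]] = value  (defaultdict(dict): missing outer key starts as {})
def pvStep (d : PySem.Dict String (PySem.Dict String Int))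
    (kv : (String × String) × Int) : PySem.Dict String (PySem.Dict String Int) :=
  d.insert kv.1.1 ((d.getD kv.1.1 PySem.Dict.empty).insert kv.1.2 kv.2)

def create_arguments_nested_dict (components_list : List (List (String × String))) (args : List Int) : List (String × List (String × Int)) :=
  -- keys = [(component["id"], prop) for component in components_list for prop in component]
  let keys := components_list.flatMap (fun c => c.map (fun p => (pvCid c, p.1)))
  -- for key, value in zip(keys, args): args_dict[key[0]][key[1]] = value
  let d := (keys.zip args).foldl pvStep PySem.Dict.empty
  d.items.map (fun p => (p.1, p.2.items))

-- ===== PORT B =====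
def create_arguments_nested_dict_alt (components_list : List (List (String × String))) (args : List Int) : List (String × List (String × Int)) :=
  -- pairs = list(zip([(c["id"], p) for c in components_list for p in c], args))
  let pairs := (components_list.flatMap (fun c => c.map (fun p => (pvCid c, p.1)))).zip args
  -- ids = list(dict.fromkeys(cid for (cid, _p), _v in pairs))
  let ids := PySem.List.dedup (pairs.map (fun q => q.1.1))
  -- {cid: {p: v for (c, p), v in pairs if c == cid} for cid in ids} — the outer keys
  -- (ids) are distinct, so this dict comprehension is the association list over ids
  ids.map (fun cid =>
    (cid, ((pairs.filter (fun q => q.1.1 == cid)).foldl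
        (fun t q => t.insert q.1.2 q.2) PySem.Dict.empty).items))

-- ===== PRECONDITION & SPEC =====
-- Pre_ excludes (a) inputs with a nonempty component lacking an "id" key, on which the
-- Python A raises KeyError, and (b) association lists with duplicate property names
-- inside a component, which do not represent any Python dict (a dict dedups its keys).
def Pre_create_arguments_nested_dict (components_list : List (List (String × String))) (args : List Int) : Prop :=
  ∀ c ∈ components_list, (c.map Prod.fst).Nodup ∧ (c ≠ [] → "id" ∈ c.map Prod.fst)
instance (components_list : List (List (String × String))) (args : List Int) : Decidable (Pre_create_arguments_nested_dict components_list args) := by unfold Pre_create_arguments_nested_dict; infer_instance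

def pvWitness_create_arguments_nested_dict : (List (List (String × String))) × List Int :=
  ([[("id", "x"), ("a", "p")], [("id", "y")]], [1, 2, 3])

def Spec_create_arguments_nested_dict (components_list : List (List (String × String))) (args : List Int) (out : List (String × List (String × Int))) : Prop := out = create_arguments_nested_dict_alt components_list args
instance (components_list : List (List (String × String))) (args : List Int) (out : List (String × List (String × Int))) : Decidable (Spec_create_arguments_nested_dict components_list args out) := by unfold Spec_create_arguments_nested_dict; infer_instance

-- ===== CLAIM (what is proved, stated in full; the proofs are below) =====
def Claim_equal_create_arguments_nested_dict : Prop := ∀ (components_list : List (List (String × String))) (args : List Int), Dom_create_arguments_nested_dict components_list args → Pre_create_arguments_nested_dict components_list args → Spec_create_arguments_nested_dict components_list args (create_arguments_nested_dict components_list args)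

-- ===== LEMMAS AND PROOFS =====

-- A's per-key invariant: after the fold, the inner dict at cid is exactly the fold of
-- the pairs whose id is cid over the inner dict the accumulator started with there.
theorem pv_getD_foldl (pairs : List ((String × String) × Int))
    (d : PySem.Dict String (PySem.Dict String Int)) (cid : String) :
    (pairs.foldl pvStep d).getD cid PySem.Dict.empty =
      (pairs.filter (fun q => q.1.1 == cid)).foldl
        (fun t q => t.insert q.1.2 q.2) (d.getD cid PySem.Dict.empty) := by
  induction pairs generalizing d with
  | nil => rfl
  | cons q rest ih =>
    simp only [List.foldl_cons, List.filter_cons]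
    by_cases h : q.1.1 = cid
    · subst h
      simp [ih, pvStep, PySem.Dict.getD_insert_self]
    · have hb : (q.1.1 == cid) = false := by simp [h]
      simp only [hb, Bool.false_eq_true, if_false, ih, pvStep]
      rw [PySem.Dict.getD_insert_of_ne (hne := Ne.symm h)]

theorem pv_keys_foldl (pairs : List ((String × String) × Int)) :
    (pairs.foldl pvStep PySem.Dict.empty).keys =
      PySem.List.dedup (pairs.map (fun q => q.1.1)) := by
  have := PySem.Dict.keys_foldl_insert_key pairs (fun q => q.1.1)
    (fun d kv => (d.getD kv.1.1 PySem.Dict.empty).insert kv.1.2 kv.2)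
    (PySem.Dict.empty)
  simpa [pvStep, PySem.Dict.keys_empty, PySem.Set.update_nil_left] using this

theorem pv_nodup_keys_foldl (pairs : List ((String × String) × Int)) :
    (pairs.foldl pvStep PySem.Dict.empty).keys.Nodup := by
  have := PySem.Dict.nodup_keys_foldl_insert_key pairs (fun q => q.1.1)
    (fun d kv => (d.getD kv.1.1 PySem.Dict.empty).insert kv.1.2 kv.2)
    (PySem.Dict.empty) (by simp [PySem.Dict.keys_empty])
  simpa [pvStep] using this

-- ===== VERDICT (by name: the statement is the Claim_ definition above) =====
theorem create_arguments_nested_dict_spec : Claim_equal_create_arguments_nested_dict := by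
  intro cl args _ _
  unfold Spec_create_arguments_nested_dict
  simp only [create_arguments_nested_dict, create_arguments_nested_dict_alt]
  set pairs := (cl.flatMap (fun c => c.map (fun p => (pvCid c, p.1)))).zip args with hp
  set d := pairs.foldl pvStep PySem.Dict.empty with hd
  rw [PySem.Dict.items_eq_map_keys d (pv_nodup_keys_foldl pairs) PySem.Dict.empty]
  rw [pv_keys_foldl pairs, List.map_map]
  refine List.map_congr_left ?_
  intro cid _
  simp only [Function.comp]
  rw [pv_getD_foldl pairs PySem.Dict.empty cid, PySem.Dict.getD_empty]
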